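-- pv_equiv track=rewrite | github.com/ArthurLabaki/Materias_UFU | IA/Trab1/Códigos/simulated_annealing.py | posicoesRainha
-- ===== SOURCE A (Python) =====
-- def posicoesRainha(tabuleiro, n):
--     listaDePosicoesDaRainhas = []
--     for i in range(1, n+1):
--         for linha in range(len(tabuleiro)):
--             for coluna in range(len(tabuleiro[linha])):
--                 if tabuleiro[linha][coluna] == i:
--                     listaDePosicoesDaRainhas = listaDePosicoesDaRainhas + \
--                         [[linha, coluna]]
--     return listaDePosicoesDaRainhas
-- ===== SOURCE B (Python) =====
-- def posicoesRainha(tabuleiro, n):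
--     buckets = {}
--     for linha, row in enumerate(tabuleiro):
--         for coluna, v in enumerate(row):
--             buckets[v] = buckets.get(v, []) + [[linha, coluna]]
--     out = []
--     for i in range(1, n + 1):
--         out += buckets.get(i, [])
--     return out
-- ===== Notes on version B (the rewrite author's own statement) =====
-- stated objective: faster
-- what changed: B scans the board once, grouping cell positions into a dict keyed by cell value, then emits the buckets for i=1..n, instead of A's full board rescan (with quadratic list re-concatenation) for every i.
import Mathlib
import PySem

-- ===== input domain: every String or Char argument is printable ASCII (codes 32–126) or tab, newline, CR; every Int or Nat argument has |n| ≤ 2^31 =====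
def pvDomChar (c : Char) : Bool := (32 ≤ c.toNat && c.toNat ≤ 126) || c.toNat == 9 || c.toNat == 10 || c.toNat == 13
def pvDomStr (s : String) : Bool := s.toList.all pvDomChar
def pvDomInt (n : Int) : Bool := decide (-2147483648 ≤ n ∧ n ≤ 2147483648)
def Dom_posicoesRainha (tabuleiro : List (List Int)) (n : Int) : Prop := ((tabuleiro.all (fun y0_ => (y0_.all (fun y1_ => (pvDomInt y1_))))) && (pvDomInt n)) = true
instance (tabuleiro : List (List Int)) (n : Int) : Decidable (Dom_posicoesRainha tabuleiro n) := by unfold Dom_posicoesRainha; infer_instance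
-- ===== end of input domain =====

-- B replaces A's per-queen full board rescan by one bucketing pass over the board
-- followed by emitting the buckets in value order (objective: faster).

-- ===== PORT A =====
def posicoesRainha (tabuleiro : List (List Int)) (n : Int) : List (List Int) :=
  (PySem.List.pyRange 1 (n + 1) 1).foldl (fun acc i =>
    (PySem.List.pyRange 0 (tabuleiro.length : Int) 1).foldl (fun acc2 linha =>
      (PySem.List.pyRange 0 ((PySem.List.pyGetD tabuleiro linha []).length : Int) 1).foldl
        (fun acc3 coluna =>
          if PySem.List.pyGetD (PySem.List.pyGetD tabuleiro linha []) coluna 0 == i then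
            acc3 ++ [[linha, coluna]]
          else acc3) acc2) acc) []

-- ===== PORT B =====
def posicoesRainha_alt (tabuleiro : List (List Int)) (n : Int) : List (List Int) :=
  let buckets : PySem.Dict Int (List (List Int)) :=
    (PySem.List.enumerate tabuleiro).foldl (fun d p =>
      (PySem.List.enumerate p.2).foldl (fun d2 q =>
        d2.modify q.2 [] (· ++ [[p.1, q.1]])) d) PySem.Dict.empty
  (PySem.List.pyRange 1 (n + 1) 1).foldl (fun out i => out ++ buckets.getD i []) []

-- ===== PRECONDITION & SPEC =====
def Spec_posicoesRainha (tabuleiro : List (List Int)) (n : Int) (out : List (List Int)) : Prop := out = posicoesRainha_alt tabuleiro n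
instance (tabuleiro : List (List Int)) (n : Int) (out : List (List Int)) : Decidable (Spec_posicoesRainha tabuleiro n out) := by unfold Spec_posicoesRainha; infer_instance

-- ===== CLAIM (what is proved, stated in full; the proofs are below) =====
def Claim_equal_posicoesRainha : Prop := ∀ (tabuleiro : List (List Int)) (n : Int), Dom_posicoesRainha tabuleiro n → Spec_posicoesRainha tabuleiro n (posicoesRainha tabuleiro n)

-- ===== LEMMAS AND PROOFS =====

/-- All cells of the board as (value, [row, col]) pairs, in row-major scan order. -/
def pvCells (tabuleiro : List (List Int)) : List (Int × List Int) :=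
  (PySem.List.enumerate tabuleiro).flatMap (fun p =>
    (PySem.List.enumerate p.2).map (fun q => (q.2, [p.1, q.1])))

theorem pv_nested_append (i : Int) (l : List (Int × List Int)) (acc : List (List Int)) :
    l.foldl (fun acc2 p =>
        (PySem.List.enumerate p.2).foldl
          (fun acc3 q => if q.2 == i then acc3 ++ [[p.1, q.1]] else acc3) acc2) acc
    = acc ++ ((l.flatMap (fun p =>
        (PySem.List.enumerate p.2).map (fun q => (q.2, [p.1, q.1])))).filter
          (fun c => c.1 == i)).map (fun c => c.2) := by
  induction l generalizing acc with
  | nil => simp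
  | cons x xs ih =>
    have hx : (PySem.List.enumerate x.2).foldl
        (fun acc3 q => if q.2 == i then acc3 ++ [[x.1, q.1]] else acc3) acc
        = acc ++ (((PySem.List.enumerate x.2).map (fun q => (q.2, [x.1, q.1]))).filter
            (fun c => c.1 == i)).map (fun c => c.2) := by
      rw [← PySem.List.foldl_append_if (fun c : Int × List Int => c.1 == i) (fun c => c.2),
        List.foldl_map]
    simp only [List.foldl_cons, hx, ih, List.flatMap_cons, List.filter_append,
      List.map_append, List.append_assoc]

theorem pv_nested_dict (l : List (Int × List Int)) (d : PySem.Dict Int (List (List Int))) :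
    l.foldl (fun d p =>
        (PySem.List.enumerate p.2).foldl (fun d2 q =>
          d2.modify q.2 [] (· ++ [[p.1, q.1]])) d) d
    = (l.flatMap (fun p =>
        (PySem.List.enumerate p.2).map (fun q => (q.2, [p.1, q.1])))).foldl
        (fun d c => d.modify c.1 [] (· ++ [c.2])) d := by
  induction l generalizing d with
  | nil => rfl
  | cons x xs ih =>
    simp only [List.foldl_cons, List.flatMap_cons, List.foldl_append, ih]
    congr 1
    rw [List.foldl_map]

theorem pv_inner_eq (tabuleiro : List (List Int)) (i : Int) (acc : List (List Int)) :
    (PySem.List.pyRange 0 (tabuleiro.length : Int) 1).foldl (fun acc2 linha =>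
      (PySem.List.pyRange 0 ((PySem.List.pyGetD tabuleiro linha []).length : Int) 1).foldl
        (fun acc3 coluna =>
          if PySem.List.pyGetD (PySem.List.pyGetD tabuleiro linha []) coluna 0 == i then
            acc3 ++ [[linha, coluna]]
          else acc3) acc2) acc
    = acc ++ ((pvCells tabuleiro).filter (fun c => c.1 == i)).map (fun c => c.2) := by
  have h2 : (PySem.List.pyRange 0 (tabuleiro.length : Int) 1).foldl (fun acc2 linha =>
      (PySem.List.pyRange 0 ((PySem.List.pyGetD tabuleiro linha []).length : Int) 1).foldl
        (fun acc3 coluna =>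
          if PySem.List.pyGetD (PySem.List.pyGetD tabuleiro linha []) coluna 0 == i then
            acc3 ++ [[linha, coluna]]
          else acc3) acc2) acc
      = (PySem.List.enumerate tabuleiro).foldl (fun acc2 p =>
          (PySem.List.enumerate p.2).foldl
            (fun acc3 q => if q.2 == i then acc3 ++ [[p.1, q.1]] else acc3) acc2) acc := by
    rw [PySem.List.enumerate_eq_map_pyRange tabuleiro [], List.foldl_map]
    apply PySem.List.foldl_congr_mem
    intro acc2 linha _
    rw [PySem.List.enumerate_eq_map_pyRange (PySem.List.pyGetD tabuleiro linha []) 0,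
      List.foldl_map]
    simp [PySem.List.len_eq]
  rw [h2, pv_nested_append, pvCells]

theorem pv_buckets_eq (tabuleiro : List (List Int)) (i : Int) :
    ((PySem.List.enumerate tabuleiro).foldl (fun d p =>
      (PySem.List.enumerate p.2).foldl (fun d2 q =>
        d2.modify q.2 [] (· ++ [[p.1, q.1]])) d)
      (PySem.Dict.empty : PySem.Dict Int (List (List Int)))).getD i []
    = ((pvCells tabuleiro).filter (fun c => c.1 == i)).map (fun c => c.2) := by
  rw [pv_nested_dict, ← pvCells, PySem.Dict.getD_foldl_modify_append]
  simp [PySem.Dict.getD, PySem.Dict.empty, PySem.Dict.get?]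

-- ===== VERDICT (by name: the statement is the Claim_ definition above) =====
theorem posicoesRainha_spec : Claim_equal_posicoesRainha := by
  intro tabuleiro n _
  unfold Spec_posicoesRainha posicoesRainha posicoesRainha_alt
  apply PySem.List.foldl_congr_mem
  intro acc i _
  rw [pv_inner_eq, pv_buckets_eq]
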